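-- pv_equiv track=rewrite | github.com/DomnicAmalan/MedBrains | medbrains/scripts/i18n_patch_pages.py | patch_aria_labels
-- ===== SOURCE A (Python) =====
-- ARIA_KEYS = {
--     "Edit": "common:aria.edit",
--     "Delete": "common:aria.delete",
--     "View details": "common:aria.viewDetails",
--     "Close": "common:aria.close",
--     "Search": "common:aria.search",
--     "Refresh": "common:aria.refresh",
--     "Add": "common:aria.add",
--     "Confirm": "common:aria.confirm",
--     "Download": "common:aria.download",
--     "Print": "common:aria.print",
--     "Copy": "common:aria.copy",
--     "More actions": "common:aria.moreActions",
--     "Settings": "common:aria.settings",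
--     "Filter": "common:aria.filter",
--     "Expand": "common:aria.expand",
--     "Collapse": "common:aria.collapse",
-- }
--
-- def patch_aria_labels(content: str) -> tuple:
--     """Replace aria-label="English" with aria-label={t("common:aria.key")}."""
--     count = 0
--     for english, key in ARIA_KEYS.items():
--         old = f'aria-label="{english}"'
--         if old in content:
--             new = f'aria-label={{t("{key}")}}'
--             content = content.replace(old, new)
--             count += 1
--     return content, count
-- ===== SOURCE B (Python) =====
-- _ARIA_LABELS = frozenset([
--     "Edit", "Delete", "View details", "Close", "Search", "Refresh", "Add",
--     "Confirm", "Download", "Print", "Copy", "More actions", "Settings",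
--     "Filter", "Expand", "Collapse",
-- ])
--
--
-- def _aria_key(english):
--     """Derive the i18n key: camelCase the English label under common:aria."""
--     words = english.split(" ")
--     camel = words[0][:1].lower() + words[0][1:]
--     for w in words[1:]:
--         camel += w[:1].upper() + w[1:]
--     return "common:aria." + camel
--
--
-- def patch_aria_labels(content: str) -> tuple:
--     """Single split pass; keys are computed from the label, not looked up."""
--     first, *parts = content.split('aria-label="')
--     out = [first]
--     matched = set()
--     for part in parts:
--         english, quote, rest = part.partition('"')
--         if quote and english in _ARIA_LABELS:
--             matched.add(english)
--             out.append('aria-label={t("' + _aria_key(english) + '")}' + rest)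
--         else:
--             out.append('aria-label="' + part)
--     return "".join(out), len(matched)
-- ===== Notes on version B (the rewrite author's own statement) =====
-- stated objective: alternative
-- what changed: A makes sixteen sequential full-string membership-test-plus-replace passes, one per hard-coded (english, key) pair; B splits the content once on the fixed aria-label prefix, recognises each label by membership in a set of the sixteen English strings, DERIVES the i18n key by camelCasing the label under common:aria. instead of storing it, and counts distinct matched labels with a set.
import Mathlib
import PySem

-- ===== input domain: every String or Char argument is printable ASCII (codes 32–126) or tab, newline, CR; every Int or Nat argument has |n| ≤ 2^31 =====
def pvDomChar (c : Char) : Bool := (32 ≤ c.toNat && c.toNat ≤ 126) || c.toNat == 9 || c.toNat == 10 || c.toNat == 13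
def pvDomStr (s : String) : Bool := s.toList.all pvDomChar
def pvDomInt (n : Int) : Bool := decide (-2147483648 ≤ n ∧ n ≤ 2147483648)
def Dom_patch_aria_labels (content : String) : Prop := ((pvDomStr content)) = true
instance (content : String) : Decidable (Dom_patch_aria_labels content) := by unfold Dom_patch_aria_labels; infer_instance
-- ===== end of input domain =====

-- B replaces A's sixteen sequential membership/replace passes over the whole string (driven by a
-- hard-coded english → key table) by ONE split on the aria-label prefix, a membership test in a set
-- of the sixteen English labels, and a key COMPUTED by camelCasing the label (same value everywhere).

-- ===== PORT A =====
-- Module constant ARIA_KEYS of program A, as an insertion-ordered dict.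
def ariaPairsL : List (List Char × List Char) := [
  ("Edit".toList, "common:aria.edit".toList),
  ("Delete".toList, "common:aria.delete".toList),
  ("View details".toList, "common:aria.viewDetails".toList),
  ("Close".toList, "common:aria.close".toList),
  ("Search".toList, "common:aria.search".toList),
  ("Refresh".toList, "common:aria.refresh".toList),
  ("Add".toList, "common:aria.add".toList),
  ("Confirm".toList, "common:aria.confirm".toList),
  ("Download".toList, "common:aria.download".toList),
  ("Print".toList, "common:aria.print".toList),
  ("Copy".toList, "common:aria.copy".toList),
  ("More actions".toList, "common:aria.moreActions".toList),
  ("Settings".toList, "common:aria.settings".toList),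
  ("Filter".toList, "common:aria.filter".toList),
  ("Expand".toList, "common:aria.expand".toList),
  ("Collapse".toList, "common:aria.collapse".toList)
]

def ARIA_KEYS : PySem.Dict (List Char) (List Char) := PySem.Dict.ofList ariaPairsL

-- the literal 'aria-label="' / 'aria-label={t("' / '")}' fragments A builds its strings from
def ariaPre : List Char := "aria-label=\"".toList
def tOpen : List Char := "aria-label={t(\"".toList
def tClose : List Char := "\")}".toList

-- literal transliteration of A: for each (english, key) in ARIA_KEYS.items(), if the old
-- aria-label string occurs, replace it everywhere and count.
def patch_aria_labels (content : String) : String × Int :=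
  let r := ARIA_KEYS.items.foldl (fun (st : List Char × Int) p =>
    let old := ariaPre ++ p.1 ++ ['"']
    if PySem.Chars.isIn old st.1 then
      (PySem.Chars.replace st.1 old (tOpen ++ p.2 ++ tClose), st.2 + 1)
    else st) (content.toList, 0)
  (String.ofList r.1, r.2)

-- ===== PORT B =====
-- Module constant _ARIA_LABELS of program B: the sixteen English labels (a frozenset; all distinct).
def ariaLabelsL : List (List Char) := [
  "Edit".toList, "Delete".toList, "View details".toList, "Close".toList,
  "Search".toList, "Refresh".toList, "Add".toList, "Confirm".toList,
  "Download".toList, "Print".toList, "Copy".toList, "More actions".toList,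
  "Settings".toList, "Filter".toList, "Expand".toList, "Collapse".toList
]

-- port of B's _aria_key: split on ' ', lowercase the first letter of the first word, uppercase
-- the first letter of every later word, join under "common:aria.".  w[:1] is ported as w.take 1
-- (exact: the slice bound is the non-negative literal 1).
def camelKey (english : List Char) : List Char :=
  match PySem.Chars.splitOn english [' '] with
  | [] => "common:aria.".toList  -- unreachable: str.split always returns at least one piece
  | w0 :: ws =>
    "common:aria.".toList ++
      ws.foldl (fun camel w => camel ++ (PySem.Chars.upper (w.take 1) ++ w.drop 1))
        (PySem.Chars.lower (w0.take 1) ++ w0.drop 1)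

-- literal transliteration of B: split once on 'aria-label="'; for each later piece, take the
-- text before its first '"' (port of part.partition('"'), exact for B's use: quote nonempty
-- ⟺ the takeWhile stopped early); patch it if it is a known label, else put the separator back.
def patch_aria_labels_alt (content : String) : String × Int :=
  match PySem.Chars.splitOn content.toList "aria-label=\"".toList with
  | [] => ("", 0)  -- unreachable: str.split always returns at least one piece
  | first :: parts =>
    let st := parts.foldl (fun (st : List (List Char) × PySem.Set (List Char)) part =>
      let english := part.takeWhile (fun c => c != '"')
      if decide (english.length < part.length) && ariaLabelsL.contains english then
        (st.1 ++ ["aria-label={t(\"".toList ++ camelKey english ++ "\")}".toList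
            ++ part.drop (english.length + 1)], st.2.add english)
      else (st.1 ++ ["aria-label=\"".toList ++ part], st.2)) ([first], PySem.Set.empty)
    (String.ofList st.1.flatten, (st.2.length : Int))

-- ===== PRECONDITION & SPEC =====
def Spec_patch_aria_labels (content : String) (out : String × Int) : Prop := out = patch_aria_labels_alt content
instance (content : String) (out : String × Int) : Decidable (Spec_patch_aria_labels content out) := by unfold Spec_patch_aria_labels; infer_instance

-- ===== CLAIM (what is proved, stated in full; the proofs are below) =====
def Claim_equal_patch_aria_labels : Prop := ∀ (content : String), Dom_patch_aria_labels content → Spec_patch_aria_labels content (patch_aria_labels content)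

-- ===== LEMMAS AND PROOFS =====

def myReplace (old new : List Char) : List Char → List Char
  | [] => []
  | c :: t =>
    if old.isPrefixOf (c :: t) then new ++ myReplace old new (t.drop (old.length - 1))
    else c :: myReplace old new t
termination_by s => s.length
decreasing_by all_goals (simp only [List.length_drop, List.length_cons]; omega)

def mySplit (sep : List Char) : List Char → List (List Char)
  | [] => [[]]
  | c :: t =>
    if sep.isPrefixOf (c :: t) then [] :: mySplit sep (t.drop (sep.length - 1))
    else match mySplit sep t with
      | [] => [[c]]
      | q :: qs => (c :: q) :: qs
termination_by s => s.length
decreasing_by all_goals (simp only [List.length_drop, List.length_cons]; omega)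

lemma replaceGo_eq (old new : List Char) (hold : old ≠ []) :
    ∀ (fuel : Nat) (l acc : List Char), l.length ≤ fuel →
      PySem.Chars.replace.go old new fuel l acc = acc.reverse ++ myReplace old new l := by
  intro fuel
  induction fuel with
  | zero =>
    intro l acc hl
    have : l = [] := List.eq_nil_of_length_eq_zero (Nat.le_zero.mp hl)
    subst this
    rw [PySem.Chars.replace.go.eq_def]
    simp [myReplace]
  | succ n ih =>
    intro l acc hl
    have holdlen : 1 ≤ old.length := by cases old with | nil => exact absurd rfl hold | cons a b => simp
    match l with
    | [] => rw [PySem.Chars.replace.go.eq_def]; simp [myReplace]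
    | c :: t =>
      have hlt : t.length ≤ n := by simpa using hl
      rw [PySem.Chars.replace.go.eq_def]
      simp only
      by_cases h : old.isPrefixOf (c :: t)
      · simp only [h, if_true]
        have hlen : (List.drop old.length (c :: t)).length ≤ n := by
          simp only [List.length_drop, List.length_cons]; omega
        rw [ih _ _ hlen]
        have hdrop : List.drop old.length (c :: t) = t.drop (old.length - 1) := by
          cases old with
          | nil => exact absurd rfl hold
          | cons o os => simp
        rw [hdrop]
        simp [myReplace, h]
      · simp only [h, if_false]
        rw [ih t (c :: acc) hlt]
        simp [myReplace, h]

lemma chars_replace_eq (s old new : List Char) (hold : old ≠ []) :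
    PySem.Chars.replace s old new = myReplace old new s := by
  unfold PySem.Chars.replace
  simp only [List.isEmpty_iff]
  rw [if_neg hold]
  simpa using replaceGo_eq old new hold s.length s [] le_rfl


lemma mySplit_ne_nil (sep s : List Char) : mySplit sep s ≠ [] := by
  cases s with
  | nil => simp [mySplit]
  | cons c t =>
    rw [mySplit]
    split
    · simp
    · split <;> simp

lemma splitGo_eq (sep : List Char) (hsep : sep ≠ []) :
    ∀ (fuel : Nat) (l cur : List Char) (acc : List (List Char)), l.length < fuel →
      PySem.Chars.splitOn.go sep fuel l cur acc
        = acc.reverse ++ (mySplit sep l).modifyHead (cur.reverse ++ ·) := by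
  intro fuel
  induction fuel with
  | zero => intro l cur acc hl; omega
  | succ n ih =>
    intro l cur acc hl
    have hseplen : 1 ≤ sep.length := by cases sep with | nil => exact absurd rfl hsep | cons a b => simp
    match l with
    | [] => rw [PySem.Chars.splitOn.go.eq_def]; simp [mySplit]
    | c :: t =>
      have hlt : t.length < n := by simpa using hl
      rw [PySem.Chars.splitOn.go.eq_def]
      simp only
      by_cases h : sep.isPrefixOf (c :: t)
      · simp only [h, if_true]
        have hlen : (List.drop sep.length (c :: t)).length < n := by
          simp only [List.length_drop, List.length_cons]; omega
        rw [ih _ _ _ hlen]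
        have hdrop : List.drop sep.length (c :: t) = t.drop (sep.length - 1) := by
          cases sep with
          | nil => exact absurd rfl hsep
          | cons o os => simp
        rw [hdrop]
        simp only [mySplit, h, if_true]
        cases mySplit sep (List.drop (sep.length - 1) t) <;> simp
      · simp only [h, if_false]
        rw [ih t (c :: cur) acc hlt]
        simp only [mySplit, h, if_false]
        rcases hq : mySplit sep t with _ | ⟨q, qs⟩
        · exact absurd hq (mySplit_ne_nil sep t)
        · simp

lemma chars_splitOn_eq (s sep : List Char) (hsep : sep ≠ []) :
    PySem.Chars.splitOn s sep = mySplit sep s := by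
  unfold PySem.Chars.splitOn
  rw [splitGo_eq sep hsep _ _ _ _ (by omega)]
  cases mySplit sep s <;> simp

-- ===== mySplit structural facts =====
lemma mySplit_head_prefix (sep : List Char) : ∀ (s q : List Char) (qs : List (List Char)),
    mySplit sep s = q :: qs → q <+: s := by
  intro s
  induction s using mySplit.induct sep with
  | case1 => intro q qs h; simp [mySplit] at h; simp [h.1.symm]
  | case2 c t hpre ih =>
    intro q qs h
    rw [mySplit, if_pos hpre] at h
    injection h with h1 h2
    subst h1
    exact List.nil_prefix
  | case3 c t hpre hnil ih => exact absurd hnil (mySplit_ne_nil sep t)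
  | case4 c t hpre q' qs' hq ih =>
    intro q qs h
    rw [mySplit, if_neg hpre, hq] at h
    injection h with h1 h2
    subst h1; subst h2
    exact List.cons_prefix_cons.mpr ⟨rfl, ih q' qs' hq⟩

lemma mySplit_recompose (sep : List Char) (hsep : sep ≠ []) : ∀ (s q : List Char) (qs : List (List Char)),
    mySplit sep s = q :: qs → s = q ++ (qs.map (fun p => sep ++ p)).flatten := by
  intro s
  induction s using mySplit.induct sep with
  | case1 =>
    intro q qs h
    simp [mySplit] at h
    obtain ⟨h1, h2⟩ := h
    subst h1; subst h2
    simp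
  | case2 c t hpre ih =>
    intro q qs h
    rw [mySplit, if_pos hpre] at h
    injection h with h1 h2
    subst h1
    cases qs with
    | nil => exact absurd h2 (mySplit_ne_nil _ _)
    | cons q' qs' =>
      have hrec := ih q' qs' h2
      have hdecomp : c :: t = sep ++ t.drop (sep.length - 1) := by
        obtain ⟨z, hz⟩ := List.isPrefixOf_iff_prefix.mp hpre
        have hzlen : z = (c :: t).drop sep.length := by rw [← hz]; simp
        have hdrop : (c :: t).drop sep.length = t.drop (sep.length - 1) := by
          cases sep with
          | nil => exact absurd rfl hsep
          | cons o os => simp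
        rw [← hz, hzlen, hdrop]
      simp only [List.map_cons, List.flatten_cons, List.nil_append]
      rw [hdecomp, hrec]
      simp
  | case3 c t hpre hnil ih => exact absurd hnil (mySplit_ne_nil sep t)
  | case4 c t hpre q' qs' hq ih =>
    intro q qs h
    rw [mySplit, if_neg hpre, hq] at h
    injection h with h1 h2
    subst h1; subst h2
    have := ih q' qs' hq
    simp [this]

lemma mySplit_sepFree (sep : List Char) (hsep : sep ≠ []) : ∀ (s : List Char),
    ∀ p ∈ mySplit sep s, ¬ sep <:+: p := by
  intro s
  induction s using mySplit.induct sep with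
  | case1 =>
    intro p hp
    simp [mySplit] at hp
    subst hp
    intro h
    exact hsep (List.eq_nil_of_infix_nil h)
  | case2 c t hpre ih =>
    intro p hp
    rw [mySplit, if_pos hpre] at hp
    rcases List.mem_cons.mp hp with rfl | hp
    · intro h; exact hsep (List.eq_nil_of_infix_nil h)
    · exact ih p hp
  | case3 c t hpre hnil ih => exact absurd hnil (mySplit_ne_nil sep t)
  | case4 c t hpre q' qs' hq ih =>
    intro p hp
    rw [mySplit, if_neg hpre, hq] at hp
    rcases List.mem_cons.mp hp with rfl | hp
    · intro h
      rcases h with ⟨u, v, huv⟩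
      cases u with
      | nil =>
        have hpref : sep <+: c :: q' := ⟨v, by simpa using huv⟩
        have hq't : q' <+: t := mySplit_head_prefix sep t q' qs' hq
        have : sep <+: c :: t := hpref.trans ((List.cons_prefix_cons).mpr ⟨rfl, hq't⟩)
        exact hpre (List.isPrefixOf_iff_prefix.mpr this)
      | cons d u' =>
        have : sep <:+: q' := ⟨u', v, by simpa using (by simpa using huv : d = c ∧ u' ++ (sep ++ v) = q').2⟩
        exact ih q' (by rw [hq]; simp) this
    · exact ih p (by rw [hq]; simp [hp])

-- ===== generic replace / infix toolkit =====
lemma infix_iff_drop (sub s : List Char) : sub <:+: s ↔ ∃ j, sub <+: s.drop j := by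
  rw [← PySem.Chars.isIn_iff_infix, ← PySem.Chars.exists_prefix_drop_iff_isIn]

lemma myReplace_skip (old new X Y : List Char)
    (h : ∀ i, i < X.length → ¬ old <+: (X.drop i ++ Y)) :
    myReplace old new (X ++ Y) = X ++ myReplace old new Y := by
  induction X with
  | nil => simp
  | cons c X' ih =>
    have h0 : ¬ old <+: c :: (X' ++ Y) := by simpa using h 0 (by simp)
    show myReplace old new (c :: (X' ++ Y)) = _
    rw [myReplace]
    rw [if_neg (fun hp => h0 (List.isPrefixOf_iff_prefix.mp hp))]
    rw [ih (fun i hi => by simpa using h (i+1) (by simp; omega))]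
    simp

lemma myReplace_head (old new Y : List Char) (hold : old ≠ []) :
    myReplace old new (old ++ Y) = new ++ myReplace old new Y := by
  cases old with
  | nil => exact absurd rfl hold
  | cons o os =>
    show myReplace (o :: os) new ((o :: os) ++ Y) = _
    simp only [List.cons_append]
    rw [myReplace]
    rw [if_pos (List.isPrefixOf_iff_prefix.mpr ⟨Y, by simp⟩)]
    have : (os ++ Y).drop ((o :: os).length - 1) = Y := by
      simp only [List.length_cons, Nat.add_sub_cancel]
      exact List.drop_left
    rw [this]

lemma infix_append_skip (old X Y : List Char)
    (h : ∀ i, i < X.length → ¬ old <+: (X.drop i ++ Y)) :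
    (old <:+: X ++ Y) ↔ (old <:+: Y) := by
  constructor
  · intro hin
    rcases (infix_iff_drop _ _).mp hin with ⟨j, hj⟩
    by_cases hjX : j < X.length
    · exfalso
      apply h j hjX
      rwa [List.drop_append_of_le_length (le_of_lt hjX)] at hj
    · have : (X ++ Y).drop j = Y.drop (j - X.length) := by
        rw [List.drop_append]
        rw [List.drop_eq_nil_of_le (by omega)]
        simp
      rw [this] at hj
      exact (infix_iff_drop _ _).mpr ⟨j - X.length, hj⟩
  · rintro ⟨u, v, rfl⟩
    exact ⟨X ++ u, v, by simp⟩

lemma prefix_trunc (P' X Y : List Char) (h : P' <+: X ++ Y) (hx : X.length ≤ P'.length) :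
    X <+: P' := by
  obtain ⟨z, hz⟩ := h
  have : X = (P' ++ z).take X.length := by rw [hz]; simp
  rw [List.take_append_of_le_length hx] at this
  rw [this]
  exact List.take_prefix _ _

lemma quote_align (a : List Char) : ∀ (b y : List Char), (∀ c ∈ a, c ≠ '"') → (∀ c ∈ b, c ≠ '"') →
    (a ++ ['"'] <+: b ++ '"' :: y) → a = b := by
  induction a with
  | nil =>
    intro b y _ hb h
    cases b with
    | nil => rfl
    | cons d b' =>
      exfalso
      have h1 : ('"' : Char) = d := by simpa using h
      exact hb d (by simp) h1.symm
  | cons c a' ih =>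
    intro b y ha hb h
    cases b with
    | nil =>
      exfalso
      simp only [List.cons_append, List.nil_append] at h
      have h1 := (List.cons_prefix_cons.mp h).1
      exact ha c (by simp) h1
    | cons d b' =>
      simp only [List.cons_append] at h
      have h' := List.cons_prefix_cons.mp h
      rw [h'.1]
      congr 1
      exact ih b' y (fun x hx => ha x (by simp [hx])) (fun x hx => hb x (by simp [hx])) h'.2

-- ===== program-specific notions =====
def W11 : List Char := "aria-label=".toList
def olde (e : List Char) : List Char := ariaPre ++ e ++ ['"']
def repV (v : List Char) : List Char := tOpen ++ v ++ tClose
def twp (part : List Char) : List Char := part.takeWhile (fun c => c != '"')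
def quoteB (part : List Char) : Bool := decide ((twp part).length < part.length)
def aftp (part : List Char) : List Char := part.drop ((twp part).length + 1)
def segD (done : List (List Char × List Char)) (part : List Char) : List Char :=
  if quoteB part then
    match List.lookup (twp part) done with
    | some v => repV v ++ aftp part
    | none => ariaPre ++ part
  else ariaPre ++ part
def chain (done : List (List Char × List Char)) (tl : List (List Char)) : List Char :=
  (tl.map (segD done)).flatten
def matchesB (e part : List Char) : Bool := quoteB part && (twp part == e)
def wstart (L : List Char) : Prop := L = [] ∨ L.take 11 = W11

-- concrete facts about the fixed fragments and the sixteen pairs, by computation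
set_option maxRecDepth 40000 in
lemma keys_nodup : (ariaPairsL.map Prod.fst).Nodup := by decide
set_option maxRecDepth 40000 in
lemma key_quoteFree_bool : (ariaPairsL.all (fun p => p.1.all (fun c => c != '"'))) = true := by decide
lemma key_quoteFree : ∀ p ∈ ariaPairsL, ∀ c ∈ p.1, c ≠ '"' := by
  intro p hp c hc
  simpa using List.all_eq_true.mp (List.all_eq_true.mp key_quoteFree_bool p hp) c hc
set_option maxRecDepth 40000 in
lemma d1_key_noW : ∀ p ∈ ariaPairsL, ∀ j ≤ p.1.length, ¬ W11 <+: p.1.drop j := by decide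
set_option maxRecDepth 40000 in
lemma d3_rep_noPat : ∀ p ∈ ariaPairsL, ¬ ariaPre <:+: repV p.2 := by decide
set_option maxRecDepth 40000 in
lemma d4_rep_suffix : ∀ p ∈ ariaPairsL, ∀ i < (repV p.2).length, ¬ ((repV p.2).drop i <+: ariaPre) := by decide
set_option maxRecDepth 40000 in
lemma d5_pat_suffix : ∀ i < 12, 0 < i → ¬ (ariaPre.drop i <+: ariaPre) := by decide
set_option maxRecDepth 40000 in
lemma w11_quoteFree_bool : (W11.all (fun c => c != '"')) = true := by decide
lemma w11_quoteFree : ∀ c ∈ W11, c ≠ '"' := by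
  intro c hc
  simpa using List.all_eq_true.mp w11_quoteFree_bool c hc
set_option maxRecDepth 40000 in
lemma pat_len : ariaPre.length = 12 := by decide
set_option maxRecDepth 40000 in
lemma pat_ne_nil : ariaPre ≠ [] := by decide
set_option maxRecDepth 40000 in
lemma pat_take11 : ariaPre.take 11 = W11 := by decide
set_option maxRecDepth 40000 in
lemma tOpen_take11 : tOpen.take 11 = W11 := by decide
set_option maxRecDepth 40000 in
lemma tOpen_len : tOpen.length = 15 := by decide
set_option maxRecDepth 40000 in
lemma pat_getElem11 : ariaPre[11]? = some '"' := by decide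

-- the three facts tying B's label set and computed key to A's table
set_option maxRecDepth 40000 in
lemma labels_eq : ariaLabelsL = ariaPairsL.map Prod.fst := by decide
set_option maxRecDepth 100000 in
lemma camel_correct : ∀ p ∈ ariaPairsL, camelKey p.1 = p.2 := by decide

lemma lookup_mem (k v : List Char) (done : List (List Char × List Char))
    (h : List.lookup k done = some v) : (k, v) ∈ done := by
  induction done with
  | nil => simp [List.lookup] at h
  | cons a t ih =>
    cases hbeq : (k == a.1) with
    | true =>
      simp only [List.lookup, hbeq] at h
      injection h with h1
      have hak : k = a.1 := by simpa using hbeq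
      have : a = (k, v) := by
        calc a = (a.1, a.2) := rfl
          _ = (k, v) := by rw [← hak, h1]
      rw [this]
      exact List.mem_cons_self
    | false =>
      simp only [List.lookup, hbeq] at h
      exact List.mem_cons_of_mem _ (ih h)

lemma lookup_of_mem_nodup (k v : List Char) (ps : List (List Char × List Char))
    (hmem : (k, v) ∈ ps) (hnd : (ps.map Prod.fst).Nodup) : List.lookup k ps = some v := by
  induction ps with
  | nil => cases hmem
  | cons a t ih =>
    rcases List.mem_cons.mp hmem with rfl | hmem'
    · simp [List.lookup]
    · have hak : a.1 ≠ k := by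
        intro hh
        have h1 : k ∈ t.map Prod.fst := List.mem_map.mpr ⟨(k, v), hmem', rfl⟩
        rw [← hh] at h1
        exact (List.nodup_cons.mp (by simpa using hnd)).1 h1
      have hbeq : (k == a.1) = false := beq_eq_false_iff_ne.mpr (fun hh => hak hh.symm)
      simp only [List.lookup, hbeq]
      exact ih hmem' (List.nodup_cons.mp (by simpa using hnd)).2

lemma contains_lookup_some (e : List Char) (hc : ariaLabelsL.contains e = true) :
    List.lookup e ariaPairsL = some (camelKey e) := by
  have hmem : e ∈ ariaLabelsL := by simpa using hc
  rw [labels_eq] at hmem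
  obtain ⟨p, hp, hpe⟩ := List.mem_map.mp hmem
  have hpair : (e, p.2) ∈ ariaPairsL := by rw [← hpe]; exact hp
  rw [lookup_of_mem_nodup e p.2 ariaPairsL hpair keys_nodup]
  rw [← camel_correct p hp, hpe]

lemma contains_lookup_none (e : List Char) (hc : ariaLabelsL.contains e = false) :
    List.lookup e ariaPairsL = none := by
  cases hl : List.lookup e ariaPairsL with
  | none => rfl
  | some v =>
    exfalso
    have hmem : e ∈ ariaPairsL.map Prod.fst :=
      List.mem_map.mpr ⟨(e, v), lookup_mem _ _ _ hl, rfl⟩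
    rw [← labels_eq] at hmem
    simp at hc
    exact hc hmem

lemma contains_eq_isSome (e : List Char) :
    ariaLabelsL.contains e = (List.lookup e ariaPairsL).isSome := by
  cases hc : ariaLabelsL.contains e
  · rw [contains_lookup_none e hc]; rfl
  · rw [contains_lookup_some e hc]; rfl

lemma olde_ne_nil (e : List Char) : olde e ≠ [] := by
  unfold olde
  exact List.append_ne_nil_of_right_ne_nil _ (by simp)

lemma olde_pre {e Z : List Char} (h : olde e <+: Z) : ariaPre <+: Z :=
  ((List.prefix_append ariaPre (e ++ ['"'])).trans (by rw [olde, List.append_assoc] at h; exact h))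

lemma prefix_split (A X R : List Char) (h : A <+: X ++ R) (hl : A.length ≤ X.length) : A <+: X := by
  obtain ⟨z, hz⟩ := h
  have h1 : A = (X ++ R).take A.length := by rw [← hz]; simp
  rw [List.take_append_of_le_length hl] at h1
  rw [h1]
  exact List.take_prefix _ _

-- an occurrence of ariaPre cannot start strictly inside a pattern-free block that is
-- followed by nothing or by a chain segment (which begins with the quote-free W11)
lemma span_refute (part X R : List Char) (hfree : ¬ ariaPre <:+: part)
    (hX : X <:+ part) (hXne : X ≠ []) (hR : wstart R) : ¬ ariaPre <+: X ++ R := by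
  intro h
  by_cases hlen : 12 ≤ X.length
  · have hpre : ariaPre <+: X := prefix_split _ _ _ h (by rw [pat_len]; exact hlen)
    exact hfree (hpre.isInfix.trans hX.isInfix)
  · push_neg at hlen
    have hXge1 : 1 ≤ X.length := List.length_pos_iff.mpr hXne
    have hlen2 : 12 ≤ X.length + R.length := by
      have := h.length_le
      simpa [pat_len] using this
    have hRne : R ≠ [] := by
      intro h0
      subst h0
      simp at hlen2
      omega
    have hTake : R.take 11 = W11 := hR.resolve_left hRne
    have h11 : (X ++ R)[11]? = some '"' := by
      obtain ⟨z, hz⟩ := h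
      rw [← hz, List.getElem?_append_left (by rw [pat_len]; omega)]
      exact pat_getElem11
    rw [List.getElem?_append_right (by omega)] at h11
    have hk : 11 - X.length < 11 := by omega
    rw [← List.getElem?_take_of_lt hk, hTake] at h11
    exact w11_quoteFree '"' (List.mem_of_getElem? h11) rfl

-- decomposition of a piece at its first quote
lemma dropWhile_eq_drop_len (l : List Char) (p : Char → Bool) :
    l.dropWhile p = l.drop (l.takeWhile p).length := by
  induction l with
  | nil => simp
  | cons c t ih =>
    by_cases hp : p c
    · simp [List.dropWhile_cons, List.takeWhile_cons, hp, ih]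
    · simp [List.dropWhile_cons, List.takeWhile_cons, hp]

lemma part_decomp (part : List Char) (h : quoteB part = true) :
    part = twp part ++ '"' :: aftp part := by
  have hlen : (part.takeWhile (fun c => c != '"')).length < part.length := by
    simpa [quoteB, twp] using h
  have hdw : part.dropWhile (fun c => c != '"') ≠ [] := by
    rw [dropWhile_eq_drop_len]
    simp only [ne_eq, List.drop_eq_nil_iff, not_le]
    omega
  have hhead : ((part.dropWhile (fun c => c != '"')).head hdw) = '"' := by
    have := List.head_dropWhile_not (fun c => c != '"') hdw
    simpa using this
  have hsplit : part = twp part ++ part.dropWhile (fun c => c != '"') :=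
    (List.takeWhile_append_dropWhile).symm
  have hdw2 : part.dropWhile (fun c => c != '"') = '"' :: aftp part := by
    conv_lhs => rw [← List.cons_head_tail hdw]
    rw [hhead]
    congr 1
    rw [dropWhile_eq_drop_len, List.tail_drop]
    rfl
  rw [hdw2] at hsplit
  exact hsplit

lemma twp_quoteFree (part : List Char) : ∀ c ∈ twp part, c ≠ '"' := by
  intro c hc
  have := List.mem_takeWhile_imp hc
  simpa using this

lemma twp_eq_self_of_not_quote (part : List Char) (h : quoteB part = false) : twp part = part := by
  have hlen : ¬ (twp part).length < part.length := by simpa [quoteB] using h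
  have hpre : twp part <+: part := List.takeWhile_prefix _
  exact List.IsPrefix.eq_of_length_le hpre (by omega)

lemma aftp_suffix (part : List Char) : aftp part <:+ part := List.drop_suffix _ _

-- ===== chain and lookup facts =====
lemma chain_nil (done : List (List Char × List Char)) : chain done [] = [] := by simp [chain]

lemma chain_cons (done : List (List Char × List Char)) (part : List Char) (tl : List (List Char)) :
    chain done (part :: tl) = segD done part ++ chain done tl := by simp [chain]

lemma take11_pat (Z : List Char) : (ariaPre ++ Z).take 11 = W11 := by
  rw [List.take_append_of_le_length (by rw [pat_len]; omega)]
  exact pat_take11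

lemma take11_tOpen (Z : List Char) : (tOpen ++ Z).take 11 = W11 := by
  rw [List.take_append_of_le_length (by rw [tOpen_len]; omega)]
  exact tOpen_take11

lemma chain_wstart (done : List (List Char × List Char)) (tl : List (List Char)) :
    wstart (chain done tl) := by
  cases tl with
  | nil => exact Or.inl (chain_nil done)
  | cons part rest =>
    right
    rw [chain_cons]
    unfold segD
    by_cases hq : quoteB part
    · simp only [hq, if_true]
      cases List.lookup (twp part) done with
      | none => simpa [List.append_assoc] using take11_pat _
      | some v => simpa [repV, List.append_assoc] using take11_tOpen _
    · simp only [hq, Bool.false_eq_true, if_false]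
      simpa [List.append_assoc] using take11_pat _

lemma lookup_eq_none_of (k : List Char) (done : List (List Char × List Char))
    (h : ∀ q ∈ done, q.1 ≠ k) : List.lookup k done = none := by
  induction done with
  | nil => rfl
  | cons a t ih =>
    have hbeq : (k == a.1) = false := beq_eq_false_iff_ne.mpr (fun hh => h a (by simp) hh.symm)
    simp only [List.lookup, hbeq]
    exact ih (fun q hq => h q (by simp [hq]))

lemma lookup_append_single_self (k v : List Char) (done : List (List Char × List Char))
    (h : ∀ q ∈ done, q.1 ≠ k) : List.lookup k (done ++ [(k, v)]) = some v := by
  induction done with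
  | nil => simp [List.lookup]
  | cons a t ih =>
    have hbeq : (k == a.1) = false := beq_eq_false_iff_ne.mpr (fun hh => h a (by simp) hh.symm)
    simp only [List.cons_append, List.lookup, hbeq]
    exact ih (fun q hq => h q (by simp [hq]))

lemma lookup_append_single_ne (k e v : List Char) (done : List (List Char × List Char))
    (hk : k ≠ e) : List.lookup k (done ++ [(e, v)]) = List.lookup k done := by
  induction done with
  | nil =>
    have hbeq : (k == e) = false := beq_eq_false_iff_ne.mpr hk
    simp [List.lookup, hbeq]
  | cons a t ih =>
    cases hbeq : (k == a.1) <;> simp only [List.cons_append, List.lookup, hbeq] <;> simp [ih]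

lemma lookup_filter_some (k v : List Char) (P : List Char × List Char → Bool)
    (ps : List (List Char × List Char)) (h : List.lookup k ps = some v) (hP : P (k, v) = true) :
    List.lookup k (ps.filter P) = some v := by
  induction ps with
  | nil => simp [List.lookup] at h
  | cons a t ih =>
    cases hbeq : (k == a.1) with
    | true =>
      simp only [List.lookup, hbeq] at h
      injection h with h1
      have hak : k = a.1 := by simpa using hbeq
      have haa : a = (k, v) := by
        calc a = (a.1, a.2) := rfl
          _ = (k, v) := by rw [← hak, h1]
      rw [List.filter_cons, if_pos (by rw [haa]; exact hP)]
      simp [List.lookup, hbeq, h1]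
    | false =>
      simp only [List.lookup, hbeq] at h
      rw [List.filter_cons]
      by_cases hPa : P a = true
      · rw [if_pos hPa]
        simp only [List.lookup, hbeq]
        exact ih h
      · rw [if_neg hPa]
        exact ih h

lemma lookup_filter_none (k : List Char) (P : List Char × List Char → Bool)
    (ps : List (List Char × List Char)) (h : List.lookup k ps = none) :
    List.lookup k (ps.filter P) = none := by
  induction ps with
  | nil => simp
  | cons a t ih =>
    cases hbeq : (k == a.1) with
    | true => simp [List.lookup, hbeq] at h
    | false =>
      simp only [List.lookup, hbeq] at h
      rw [List.filter_cons]
      by_cases hPa : P a = true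
      · rw [if_pos hPa]
        simp only [List.lookup, hbeq]
        exact ih h
      · rw [if_neg hPa]
        exact ih h

-- ===== the two per-segment safety lemmas =====
lemma safe_raw (e v part REST : List Char) (he : (e, v) ∈ ariaPairsL)
    (hfree : ¬ ariaPre <:+: part) (hR : wstart REST)
    (hnm : ¬ (quoteB part = true ∧ twp part = e)) :
    ∀ i, i < (ariaPre ++ part).length → ¬ olde e <+: ((ariaPre ++ part).drop i ++ REST) := by
  intro i hi h
  by_cases hi0 : i = 0
  · subst hi0
    rw [List.drop_zero, List.append_assoc] at h
    have h' : e ++ ['"'] <+: part ++ REST := by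
      apply (List.prefix_append_right_inj ariaPre).mp
      simpa [olde, List.append_assoc] using h
    by_cases hq : quoteB part = true
    · have htw : twp part ≠ e := fun hh => hnm ⟨hq, hh⟩
      have h'' : e ++ ['"'] <+: twp part ++ '"' :: (aftp part ++ REST) := by
        conv at h' => rw [part_decomp part hq]
        simpa [List.append_assoc] using h'
      exact htw (quote_align e (twp part) _
        (fun c hc => key_quoteFree (e, v) he c hc) (twp_quoteFree part) h'').symm
    · have hqf : ∀ c ∈ part, c ≠ '"' := by
        rw [← twp_eq_self_of_not_quote part (by simpa using hq)]
        exact twp_quoteFree part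
      by_cases hlen : e.length + 1 ≤ part.length
      · have hp : e ++ ['"'] <+: part := prefix_split _ _ _ h' (by simp; omega)
        exact hqf '"' (hp.subset (by simp)) rfl
      · have hple : part.length ≤ e.length := by omega
        have hrev : part <+: e ++ ['"'] := by
          obtain ⟨z, hz⟩ := h'
          have hpp : part <+: (e ++ ['"']) ++ z := by
            rw [hz]
            exact List.prefix_append _ _
          exact prefix_split _ _ _ hpp (by simp; omega)
        have hpe : part <+: e := prefix_split _ _ _ hrev hple
        have he2 : e = part ++ e.drop part.length := (List.prefix_append_drop hpe)
        have h2 : e.drop part.length ++ ['"'] <+: REST := by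
          apply (List.prefix_append_right_inj part).mp
          conv at h' => rw [he2]
          simpa [List.append_assoc] using h'
        have hRne : REST ≠ [] := by
          intro h0
          subst h0
          have := h2.length_le
          simp at this
        have hTake : REST.take 11 = W11 := hR.resolve_left hRne
        by_cases h11 : (e.drop part.length).length < 11
        · have hx : REST[(e.drop part.length).length]? = some '"' := by
            obtain ⟨z, hz⟩ := h2
            rw [← hz, List.append_assoc, List.getElem?_append_right (le_refl _)]
            simp
          rw [← List.getElem?_take_of_lt h11, hTake] at hx
          exact w11_quoteFree '"' (List.mem_of_getElem? hx) rfl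
        · have hsub : e.drop part.length <+: REST :=
            (List.prefix_append _ _).trans h2
          have hW : W11 <+: e.drop part.length := by
            obtain ⟨z, hz⟩ := hsub
            rw [← hTake, ← hz, List.take_append_of_le_length (by omega)]
            exact List.take_prefix _ _
          exact d1_key_noW (e, v) he part.length hple hW
  · have hP := olde_pre h
    by_cases hi12 : i < 12
    · have hdrop : (ariaPre ++ part).drop i = ariaPre.drop i ++ part :=
        List.drop_append_of_le_length (by rw [pat_len]; omega)
      rw [hdrop, List.append_assoc] at hP
      have hX : ariaPre.drop i <+: ariaPre :=
        prefix_trunc _ _ _ hP (by simp [pat_len]; try omega)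
      exact d5_pat_suffix i hi12 (by omega) hX
    · have hdrop : (ariaPre ++ part).drop i = part.drop (i - 12) := by
        rw [List.drop_append, List.drop_eq_nil_of_le (by rw [pat_len]; omega), pat_len]
        simp
      rw [hdrop] at hP
      have hne : part.drop (i - 12) ≠ [] := by
        simp only [ne_eq, List.drop_eq_nil_iff, not_le]
        simp [pat_len] at hi
        omega
      exact span_refute part _ REST hfree (List.drop_suffix _ _) hne hR hP

lemma safe_done (e v : List Char) (p' : List Char × List Char) (part REST : List Char)
    (hd : p' ∈ ariaPairsL)
    (hfree : ¬ ariaPre <:+: part) (hR : wstart REST) :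
    ∀ i, i < (repV p'.2 ++ aftp part).length →
      ¬ olde e <+: ((repV p'.2 ++ aftp part).drop i ++ REST) := by
  intro i hi h
  have hP := olde_pre h
  by_cases hiR : i < (repV p'.2).length
  · have hdrop : (repV p'.2 ++ aftp part).drop i = (repV p'.2).drop i ++ aftp part :=
      List.drop_append_of_le_length (le_of_lt hiR)
    rw [hdrop, List.append_assoc] at hP
    by_cases hlen : 12 ≤ ((repV p'.2).drop i).length
    · have hpre : ariaPre <+: (repV p'.2).drop i :=
        prefix_split _ _ _ hP (by rw [pat_len]; exact hlen)
      exact d3_rep_noPat p' hd (hpre.isInfix.trans (List.drop_suffix i _).isInfix)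
    · have hX : (repV p'.2).drop i <+: ariaPre :=
        prefix_trunc _ _ _ hP (by rw [pat_len]; omega)
      exact d4_rep_suffix p' hd i hiR hX
  · have hdrop : (repV p'.2 ++ aftp part).drop i = (aftp part).drop (i - (repV p'.2).length) := by
      rw [List.drop_append, List.drop_eq_nil_of_le (by omega)]
      simp
    rw [hdrop] at hP
    have hne : (aftp part).drop (i - (repV p'.2).length) ≠ [] := by
      simp only [ne_eq, List.drop_eq_nil_iff, not_le]
      simp at hi
      omega
    exact span_refute part _ REST hfree
      ((List.drop_suffix _ _).trans (aftp_suffix part)) hne hR hP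

-- ===== the heart: one key's replace pass acts segment-wise on the chain =====
lemma core (e v : List Char) (he : (e, v) ∈ ariaPairsL) :
    ∀ (tl : List (List Char)) (done : List (List Char × List Char)),
      (∀ part ∈ tl, ¬ ariaPre <:+: part) →
      (∀ q ∈ done, q ∈ ariaPairsL) →
      (∀ q ∈ done, q.1 ≠ e) →
      myReplace (olde e) (repV v) (chain done tl) = chain (done ++ [(e, v)]) tl
      ∧ ((olde e <:+: chain done tl) ↔ (tl.any (matchesB e) = true)) := by
  intro tl
  induction tl with
  | nil =>
    intro done htl hdone hke
    refine ⟨by simp [chain_nil, myReplace], ?_⟩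
    simp only [chain_nil, List.any_nil]
    constructor
    · intro hin
      exact absurd (List.eq_nil_of_infix_nil hin) (olde_ne_nil e)
    · intro hf; cases hf
  | cons part rest ih =>
    intro done htl hdone hke
    have hfree : ¬ ariaPre <:+: part := htl part (by simp)
    have hrest : ∀ p ∈ rest, ¬ ariaPre <:+: p := fun p hp => htl p (by simp [hp])
    obtain ⟨ihrep, ihinf⟩ := ih done hrest hdone hke
    have hR := chain_wstart done rest
    rw [chain_cons, chain_cons]
    by_cases hm : quoteB part = true ∧ twp part = e
    · -- this segment is a fresh match for e
      obtain ⟨hq, htw⟩ := hm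
      have hlk : List.lookup (twp part) done = none :=
        lookup_eq_none_of _ _ (fun q hq' => by rw [htw]; exact hke q hq')
      have hsegd : segD done part = ariaPre ++ part := by
        unfold segD
        rw [if_pos hq, hlk]
      have hlk' : List.lookup (twp part) (done ++ [(e, v)]) = some v := by
        rw [htw]
        exact lookup_append_single_self _ _ _ hke
      have hsegd' : segD (done ++ [(e, v)]) part = repV v ++ aftp part := by
        unfold segD
        rw [if_pos hq, hlk']
      have hshape : segD done part ++ chain done rest
          = olde e ++ (aftp part ++ chain done rest) := by
        rw [hsegd]
        conv_lhs => rw [part_decomp part hq]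
        rw [htw]
        simp [olde, List.append_assoc]
      constructor
      · rw [hshape, myReplace_head _ _ _ (olde_ne_nil e)]
        rw [myReplace_skip _ _ _ _ (fun i hi hpre => by
          exact span_refute part _ _ hfree
            ((List.drop_suffix _ _).trans (aftp_suffix part))
            (by simp only [ne_eq, List.drop_eq_nil_iff, not_le]; omega)
            hR (olde_pre hpre))]
        rw [ihrep, hsegd']
        simp [List.append_assoc]
      · rw [hshape]
        constructor
        · intro _
          simp [matchesB, hq, htw]
        · intro _
          exact ⟨[], aftp part ++ chain done rest, by simp⟩
    · -- this segment does not contain a fresh occurrence of olde e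
      have hsafe : ∀ i, i < (segD done part).length →
          ¬ olde e <+: ((segD done part).drop i ++ chain done rest) := by
        by_cases hq : quoteB part = true
        · cases hlk : List.lookup (twp part) done with
          | none =>
            have hsegd : segD done part = ariaPre ++ part := by unfold segD; rw [if_pos hq, hlk]
            rw [hsegd]
            exact safe_raw e v part _ he hfree hR hm
          | some v' =>
            have hsegd : segD done part = repV v' ++ aftp part := by unfold segD; rw [if_pos hq, hlk]
            rw [hsegd]
            exact safe_done e v (twp part, v') part _ (hdone _ (lookup_mem _ _ _ hlk)) hfree hR
        · have hsegd : segD done part = ariaPre ++ part := by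
            unfold segD
            rw [if_neg (by simpa using hq)]
          rw [hsegd]
          exact safe_raw e v part _ he hfree hR hm
      have hsegd_same : segD (done ++ [(e, v)]) part = segD done part := by
        by_cases hq : quoteB part = true
        · have htw : twp part ≠ e := fun hh => hm ⟨hq, hh⟩
          unfold segD
          rw [if_pos hq, if_pos hq, lookup_append_single_ne _ _ _ _ htw]
        · unfold segD
          rw [if_neg (by simpa using hq), if_neg (by simpa using hq)]
      constructor
      · rw [myReplace_skip _ _ _ _ hsafe, ihrep, hsegd_same]
      · rw [infix_append_skip _ _ _ hsafe, ihinf]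
        have hmB : matchesB e part = false := by
          simp only [matchesB, Bool.and_eq_true, beq_iff_eq] at *
          by_cases hq : quoteB part = true
          · simp [hq]
            exact fun hh => hm ⟨hq, hh⟩
          · simp [Bool.eq_false_iff.mpr hq]
        simp [hmB]

-- ===== the two fold loops, characterized =====
def stepA : (List Char × Int) → (List Char × List Char) → (List Char × Int) := fun st p =>
  let old := ariaPre ++ p.1 ++ ['"']
  if PySem.Chars.isIn old st.1 then
    (PySem.Chars.replace st.1 old (tOpen ++ p.2 ++ tClose), st.2 + 1)
  else st

def stepB : (List (List Char) × PySem.Set (List Char)) → List Char → (List (List Char) × PySem.Set (List Char)) := fun st part =>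
  let english := part.takeWhile (fun c => c != '"')
  if decide (english.length < part.length) && ariaLabelsL.contains english then
    (st.1 ++ ["aria-label={t(\"".toList ++ camelKey english ++ "\")}".toList
        ++ part.drop (english.length + 1)], st.2.add english)
  else (st.1 ++ ["aria-label=\"".toList ++ part], st.2)

-- A's loop, one key at a time
lemma foldA_char (p0 : List Char) (hfree0 : ¬ ariaPre <:+: p0) :
    ∀ (ks done : List (List Char × List Char)) (tl : List (List Char)) (n : Int),
      (∀ part ∈ tl, ¬ ariaPre <:+: part) →
      (∀ q ∈ ks, q ∈ ariaPairsL) → (∀ q ∈ done, q ∈ ariaPairsL) →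
      ((done ++ ks).map Prod.fst).Nodup →
      List.foldl stepA (p0 ++ chain done tl, n) ks
        = (p0 ++ chain (done ++ ks.filter (fun q => tl.any (matchesB q.1))) tl,
           n + ((ks.filter (fun q => tl.any (matchesB q.1))).length : Int)) := by
  intro ks
  induction ks with
  | nil => intro done tl n _ _ _ _; simp
  | cons ev ks' ih =>
    intro done tl n htl hks hdone hnd
    obtain ⟨e, v⟩ := ev
    have he : (e, v) ∈ ariaPairsL := hks _ (by simp)
    have hke : ∀ q ∈ done, q.1 ≠ e := by
      intro q hq hh
      have h1 : e ∈ done.map Prod.fst := List.mem_map.mpr ⟨q, hq, hh⟩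
      have hdisj := (List.nodup_append.mp (by simpa using hnd)).2.2
      exact hdisj e h1 e (by simp) rfl
    obtain ⟨hrep, hinf⟩ := core e v he tl done htl hdone hke
    have hhead : ∀ i, i < p0.length → ¬ olde e <+: (p0.drop i ++ chain done tl) := by
      intro i hi hpre
      exact span_refute p0 _ _ hfree0 (List.drop_suffix _ _)
        (by simp only [ne_eq, List.drop_eq_nil_iff, not_le]; omega)
        (chain_wstart done tl) (olde_pre hpre)
    have hiff : (PySem.Chars.isIn (olde e) (p0 ++ chain done tl) = true)
        ↔ (tl.any (matchesB e) = true) := by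
      rw [PySem.Chars.isIn_iff_infix, infix_append_skip _ _ _ hhead, hinf]
    have hstep : stepA (p0 ++ chain done tl, n) (e, v)
        = if tl.any (matchesB e) = true
          then (p0 ++ chain (done ++ [(e, v)]) tl, n + 1)
          else (p0 ++ chain done tl, n) := by
      show (if PySem.Chars.isIn (olde e) (p0 ++ chain done tl) = true
            then (PySem.Chars.replace (p0 ++ chain done tl) (olde e) (repV v), n + 1)
            else (p0 ++ chain done tl, n)) = _
      by_cases hc : tl.any (matchesB e) = true
      · rw [if_pos (hiff.mpr hc), if_pos hc]
        rw [chars_replace_eq _ _ _ (olde_ne_nil e)]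
        rw [myReplace_skip _ _ _ _ hhead, hrep]
      · rw [if_neg (fun hh => hc (hiff.mp hh)), if_neg hc]
    rw [List.foldl_cons, hstep]
    by_cases hc : tl.any (matchesB e) = true
    · rw [if_pos hc]
      have := ih (done ++ [(e, v)]) tl (n + 1) htl
        (fun q hq => hks q (by simp [hq]))
        (fun q hq => by
          rcases List.mem_append.mp hq with h1 | h1
          · exact hdone q h1
          · simp at h1; rw [h1]; exact he)
        (by rw [List.append_assoc]; exact hnd)
      rw [this]
      have hfilter : (((e, v) :: ks').filter (fun q => tl.any (matchesB q.1)))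
          = (e, v) :: ks'.filter (fun q => tl.any (matchesB q.1)) := by
        rw [List.filter_cons, if_pos (by simpa using hc)]
      rw [hfilter]
      simp only [Prod.mk.injEq]
      refine ⟨by rw [List.append_assoc, List.singleton_append], by rw [List.length_cons]; push_cast; omega⟩
    · rw [if_neg hc]
      have := ih done tl n htl
        (fun q hq => hks q (by simp [hq]))
        hdone
        (by
          refine List.Sublist.nodup (List.Sublist.map _ ?_) hnd
          exact (List.append_sublist_append_left _).mpr (List.sublist_cons_self _ _))
      rw [this]
      have hfilter : (((e, v) :: ks').filter (fun q => tl.any (matchesB q.1)))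
          = ks'.filter (fun q => tl.any (matchesB q.1)) := by
        rw [List.filter_cons, if_neg (by simpa using hc)]
      rw [hfilter]

-- B's loop
def segB (part : List Char) : List Char :=
  if quoteB part && ariaLabelsL.contains (twp part) then
    tOpen ++ camelKey (twp part) ++ tClose ++ aftp part
  else ariaPre ++ part

def msOf (parts : List (List Char)) : List (List Char) :=
  parts.filterMap (fun part =>
    if quoteB part && ariaLabelsL.contains (twp part) then some (twp part) else none)

lemma foldB_char : ∀ (parts : List (List Char)) (acc : List (List Char)) (seen : PySem.Set (List Char)),
    List.foldl stepB (acc, seen) parts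
      = (acc ++ parts.map segB, List.foldl PySem.Set.add seen (msOf parts)) := by
  intro parts
  induction parts with
  | nil => intro acc seen; simp [msOf]
  | cons part rest ih =>
    intro acc seen
    rw [List.foldl_cons]
    have hstep : stepB (acc, seen) part
        = if quoteB part && ariaLabelsL.contains (twp part)
          then (acc ++ [segB part], seen.add (twp part))
          else (acc ++ [segB part], seen) := by
      show (if quoteB part && ariaLabelsL.contains (twp part) then
              (acc ++ [tOpen ++ camelKey (twp part) ++ tClose ++ aftp part],
               PySem.Set.add seen (twp part))
            else (acc ++ [ariaPre ++ part], seen)) = _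
      unfold segB
      cases h : (quoteB part && ariaLabelsL.contains (twp part)) <;> simp [h]
    rw [hstep]
    by_cases hc : (quoteB part && ariaLabelsL.contains (twp part)) = true
    · rw [if_pos hc, ih]
      have hms : msOf (part :: rest) = twp part :: msOf rest := by
        unfold msOf
        rw [List.filterMap_cons, if_pos hc]
      rw [hms]
      simp [List.append_assoc]
    · rw [if_neg hc, ih]
      have hms : msOf (part :: rest) = msOf rest := by
        unfold msOf
        rw [List.filterMap_cons, if_neg hc]
      rw [hms]
      simp [List.append_assoc]

-- ===== aligning B's rendering and count with A's =====
lemma segD_nil (part : List Char) : segD [] part = ariaPre ++ part := by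
  unfold segD
  cases hq : quoteB part <;> simp [List.lookup]

lemma segB_eq_segD (tl : List (List Char)) (part : List Char) (hp : part ∈ tl) :
    segB part = segD (ariaPairsL.filter (fun q => tl.any (matchesB q.1))) part := by
  by_cases hq : quoteB part = true
  · cases hc : ariaLabelsL.contains (twp part) with
    | true =>
      have hlook : List.lookup (twp part) ariaPairsL = some (camelKey (twp part)) :=
        contains_lookup_some _ hc
      have hPq : (fun (q : List Char × List Char) => tl.any (matchesB q.1))
          (twp part, camelKey (twp part)) = true := by
        simp only
        exact List.any_eq_true.mpr ⟨part, hp, by simp [matchesB, hq]⟩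
      have hlf := lookup_filter_some (twp part) (camelKey (twp part))
          (fun q => tl.any (matchesB q.1)) ariaPairsL hlook hPq
      unfold segB segD
      rw [hq, hc, hlf]
      simp [repV, List.append_assoc]
    | false =>
      have hlf := lookup_filter_none (twp part)
        (fun q => tl.any (matchesB q.1)) ariaPairsL (contains_lookup_none _ hc)
      unfold segB segD
      rw [hq, hc, hlf]
      simp
  · have hq' : quoteB part = false := by simpa using hq
    unfold segB segD
    rw [hq']
    simp

lemma count_eq (tl : List (List Char)) :
    (PySem.Set.ofList (msOf tl)).length
      = (ariaPairsL.filter (fun q => tl.any (matchesB q.1))).length := by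
  have h1 : (PySem.Set.ofList (msOf tl)).Nodup := PySem.Set.nodup_ofList _
  have h2 : ((ariaPairsL.filter (fun q => tl.any (matchesB q.1))).map Prod.fst).Nodup :=
    List.Sublist.nodup (List.Sublist.map Prod.fst (List.filter_sublist)) keys_nodup
  have hext : ∀ x, x ∈ PySem.Set.ofList (msOf tl)
      ↔ x ∈ (ariaPairsL.filter (fun q => tl.any (matchesB q.1))).map Prod.fst := by
    intro x
    rw [PySem.Set.mem_ofList]
    constructor
    · intro hx
      obtain ⟨part, hpart, hfx⟩ := List.mem_filterMap.mp hx
      by_cases hc : (quoteB part && ariaLabelsL.contains (twp part)) = true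
      · rw [if_pos hc] at hfx
        injection hfx with hfx
        obtain ⟨hq, hcont⟩ := Bool.and_eq_true_iff.mp hc
        have hv : List.lookup (twp part) ariaPairsL = some (camelKey (twp part)) :=
          contains_lookup_some _ hcont
        refine List.mem_map.mpr ⟨(twp part, camelKey (twp part)), ?_, by rw [hfx]⟩
        refine List.mem_filter.mpr ⟨lookup_mem _ _ _ hv, ?_⟩
        exact List.any_eq_true.mpr ⟨part, hpart, by simp [matchesB, hq]⟩
      · rw [if_neg hc] at hfx
        cases hfx
    · intro hx
      obtain ⟨q, hq, hqx⟩ := List.mem_map.mp hx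
      obtain ⟨hqmem, hqP⟩ := List.mem_filter.mp hq
      obtain ⟨part, hpart, hmB⟩ := List.any_eq_true.mp hqP
      obtain ⟨hquote, htw⟩ := Bool.and_eq_true_iff.mp hmB
      have htw' : twp part = q.1 := by simpa using htw
      have hlook : List.lookup q.1 ariaPairsL = some q.2 :=
        lookup_of_mem_nodup _ _ _ (by simpa using hqmem) keys_nodup
      have hcont : ariaLabelsL.contains (twp part) = true := by
        rw [htw', contains_eq_isSome, hlook]
        rfl
      refine List.mem_filterMap.mpr ⟨part, hpart, ?_⟩
      rw [if_pos (by rw [hquote, hcont]; rfl)]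
      rw [htw', hqx]
  have hperm := (List.perm_ext_iff_of_nodup h1 h2).mpr hext
  rw [hperm.length_eq, List.length_map]

-- ===== VERDICT (by name: the statement is the Claim_ definition above) =====
theorem patch_aria_labels_spec : Claim_equal_patch_aria_labels := by
  unfold Claim_equal_patch_aria_labels
  intro content _
  unfold Spec_patch_aria_labels
  obtain ⟨p0, tl, hsplit⟩ : ∃ p0 tl, mySplit ariaPre content.toList = p0 :: tl := by
    cases h : mySplit ariaPre content.toList with
    | nil => exact absurd h (mySplit_ne_nil _ _)
    | cons a b => exact ⟨a, b, rfl⟩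
  have hsplit' : PySem.Chars.splitOn content.toList ariaPre = p0 :: tl := by
    rw [chars_splitOn_eq _ _ pat_ne_nil]; exact hsplit
  have hfree0 : ¬ ariaPre <:+: p0 :=
    mySplit_sepFree _ pat_ne_nil _ _ (by rw [hsplit]; simp)
  have htl : ∀ part ∈ tl, ¬ ariaPre <:+: part := fun part hp =>
    mySplit_sepFree _ pat_ne_nil _ _ (by rw [hsplit]; simp [hp])
  have hrecomp : content.toList = p0 ++ chain [] tl := by
    have h0 := mySplit_recompose ariaPre pat_ne_nil _ _ _ hsplit
    rw [h0]
    congr 1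
    unfold chain
    congr 1
    exact (List.map_congr_left (fun part _ => (segD_nil part).symm))
  have hA : patch_aria_labels content
      = (String.ofList (List.foldl stepA (content.toList, 0) ariaPairsL).1,
         (List.foldl stepA (content.toList, 0) ariaPairsL).2) := rfl
  have hB : patch_aria_labels_alt content
      = (String.ofList (List.foldl stepB ([p0], PySem.Set.empty) tl).1.flatten,
         ((List.foldl stepB ([p0], PySem.Set.empty) tl).2.length : Int)) := by
    have hsplit'' : PySem.Chars.splitOn content.toList "aria-label=\"".toList = p0 :: tl := hsplit'
    unfold patch_aria_labels_alt
    rw [hsplit'']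
    rfl
  rw [hA, hB, foldB_char]
  rw [hrecomp]
  rw [foldA_char p0 hfree0 ariaPairsL [] tl 0 htl (fun q hq => hq) (by simp)
    (by simpa using keys_nodup)]
  have hset : List.foldl PySem.Set.add PySem.Set.empty (msOf tl)
      = PySem.Set.ofList (msOf tl) := (PySem.Set.ofList_eq_foldl _).symm
  simp only [hset]
  simp only [Prod.mk.injEq]
  constructor
  · congr 1
    have hmap : tl.map segB
        = tl.map (segD (ariaPairsL.filter (fun q => tl.any (matchesB q.1)))) :=
      List.map_congr_left (fun part hp => segB_eq_segD tl part hp)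
    rw [hmap]
    simp [chain, List.flatten_append]
  · rw [count_eq tl]
    omega
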